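-- pv_equiv track=rewrite | github.com/maxppp000/GolfSwings_analysis_AI_xfyun-api | translate_aggressive.py | fix_common_locale_artifacts
-- ===== SOURCE A (Python) =====
-- def fix_common_locale_artifacts(text: str) -> str:
--     """
--     Apply safe replacements that convert zh-CN specific markup to English defaults.
--     """
--     replacements = {
--         'lang="zh-CN"': 'lang="en"',
--         "lang='zh-CN'": "lang='en'",
--         'lang="zh"': 'lang="en"',
--         "lang='zh'": "lang='en'",
--     }
--     for src, dst in replacements.items():
--         text = text.replace(src, dst)
--     return text
-- ===== SOURCE B (Python) =====
-- def fix_common_locale_artifacts(text: str) -> str: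
--     """Single left-to-right scan; one pass instead of four full replace passes."""
--     out = []
--     i = 0
--     n = len(text)
--     while i < n:
--         if text.startswith('lang="zh-CN"', i):
--             out.append('lang="en"')
--             i += 12
--         elif text.startswith("lang='zh-CN'", i):
--             out.append("lang='en'")
--             i += 12
--         elif text.startswith('lang="zh"', i):
--             out.append('lang="en"')
--             i += 9
--         elif text.startswith("lang='zh'", i):
--             out.append("lang='en'")
--             i += 9
--         else:
--             out.append(text[i])
--             i += 1
--     return ''.join(out)
-- ===== Notes on version B (the rewrite author's own statement) =====
-- stated objective: alternative
-- what changed: Replaces four sequential full-string str.replace passes (each building a new intermediate string) with a single left-to-right scan that matches the four patterns positionally and emits the output once.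
import Mathlib
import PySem

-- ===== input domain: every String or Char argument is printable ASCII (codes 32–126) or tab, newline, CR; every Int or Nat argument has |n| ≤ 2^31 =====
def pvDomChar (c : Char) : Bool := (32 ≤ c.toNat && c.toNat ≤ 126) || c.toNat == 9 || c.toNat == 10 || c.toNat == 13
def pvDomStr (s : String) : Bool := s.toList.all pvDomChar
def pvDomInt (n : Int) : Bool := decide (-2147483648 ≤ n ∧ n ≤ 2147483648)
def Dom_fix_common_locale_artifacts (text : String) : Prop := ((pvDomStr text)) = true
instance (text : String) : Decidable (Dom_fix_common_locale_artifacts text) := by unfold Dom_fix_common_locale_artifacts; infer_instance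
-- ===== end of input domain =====

-- B replaces A's four sequential full-string str.replace passes by one left-to-right scan
-- that tests the four patterns positionally and emits the output once (alternative, not faster).

-- ===== PORT A =====
def fix_common_locale_artifacts (text : String) : String :=
  -- the dict literal has four distinct keys; iterating items() applies the four replaces in order
  let t1 := PySem.Str.replace text "lang=\"zh-CN\"" "lang=\"en\""
  let t2 := PySem.Str.replace t1 "lang='zh-CN'" "lang='en'"
  let t3 := PySem.Str.replace t2 "lang=\"zh\"" "lang=\"en\""
  PySem.Str.replace t3 "lang='zh'" "lang='en'"

-- ===== PORT B =====
-- the four patterns and the two replacement strings, as char lists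
def pvP1 : List Char := ['l','a','n','g','=','"','z','h','-','C','N','"']
def pvP2 : List Char := ['l','a','n','g','=','\'','z','h','-','C','N','\'']
def pvP3 : List Char := ['l','a','n','g','=','"','z','h','"']
def pvP4 : List Char := ['l','a','n','g','=','\'','z','h','\'']
def pvRd : List Char := ['l','a','n','g','=','"','e','n','"']
def pvRs : List Char := ['l','a','n','g','=','\'','e','n','\'']

-- the while loop of Source B: at each position try the four patterns (startswith), else copy one char
def pvScanGo : List Char → List Char
  | [] => []
  | c :: cs =>
    if pvP1 <+: (c :: cs) then pvRd ++ pvScanGo (List.drop 11 cs)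
    else if pvP2 <+: (c :: cs) then pvRs ++ pvScanGo (List.drop 11 cs)
    else if pvP3 <+: (c :: cs) then pvRd ++ pvScanGo (List.drop 8 cs)
    else if pvP4 <+: (c :: cs) then pvRs ++ pvScanGo (List.drop 8 cs)
    else c :: pvScanGo cs
termination_by l => l.length
decreasing_by all_goals first | (simp; omega) | simp

def fix_common_locale_artifacts_alt (text : String) : String :=
  String.ofList (pvScanGo text.toList)

-- ===== PRECONDITION & SPEC =====
def Spec_fix_common_locale_artifacts (text : String) (out : String) : Prop := out = fix_common_locale_artifacts_alt text
instance (text : String) (out : String) : Decidable (Spec_fix_common_locale_artifacts text out) := by unfold Spec_fix_common_locale_artifacts; infer_instance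

-- ===== CLAIM (what is proved, stated in full; the proofs are below) =====
def Claim_equal_fix_common_locale_artifacts : Prop := ∀ (text : String), Dom_fix_common_locale_artifacts text → Spec_fix_common_locale_artifacts text (fix_common_locale_artifacts text)

-- ===== LEMMAS AND PROOFS =====

-- clean recursive form of Python's str.replace for a nonempty pattern
def pvRep (o n : List Char) : List Char → List Char
  | [] => []
  | c :: t => if o <+: (c :: t) then n ++ pvRep o n (List.drop (o.length - 1) t) else c :: pvRep o n t
termination_by l => l.length
decreasing_by all_goals first | (simp; omega) | simp

theorem pvGo_spec (o n : List Char) (ho : o ≠ []) :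
    ∀ (fuel : Nat) (l acc : List Char), l.length ≤ fuel →
      PySem.Chars.replace.go o n fuel l acc = acc.reverse ++ pvRep o n l := by
  intro fuel
  induction fuel with
  | zero =>
    intro l acc hl
    have : l = [] := List.eq_nil_of_length_eq_zero (Nat.le_zero.mp hl)
    subst this
    simp [PySem.Chars.replace.go, pvRep]
  | succ m ih =>
    intro l acc hl
    cases l with
    | nil => simp [PySem.Chars.replace.go, pvRep]
    | cons c t =>
      obtain ⟨o0, os, rfl⟩ : ∃ o0 os, o = o0 :: os := by
        cases o with
        | nil => exact absurd rfl ho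
        | cons a b => exact ⟨a, b, rfl⟩
      rw [PySem.Chars.replace.go]
      by_cases hp : (o0 :: os) <+: (c :: t)
      · rw [if_pos (by exact (List.isPrefixOf_iff_prefix).mpr hp)]
        rw [ih _ _ (by simp at hl ⊢; omega)]
        rw [pvRep, if_pos hp]
        simp [List.drop_succ_cons]
      · rw [if_neg (by simp [List.isPrefixOf_iff_prefix, hp])]
        rw [ih _ _ (by simp at hl ⊢; omega)]
        rw [pvRep, if_neg hp]
        simp

theorem pvReplace_eq_rep (o n s : List Char) (ho : o ≠ []) :
    PySem.Chars.replace s o n = pvRep o n s := by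
  rw [PySem.Chars.replace, if_neg (by simp [List.isEmpty_iff, ho])]
  simpa using pvGo_spec o n ho s.length s [] le_rfl

-- a mismatch inside the concrete block forbids a prefix match, whatever follows
theorem pvNpa (o B w : List Char) (i : Nat) (h1 : i < o.length) (h2 : i < B.length)
    (h3 : o[i]? ≠ B[i]?) : ¬ o <+: (B ++ w) := by
  intro hp
  obtain ⟨t, ht⟩ := hp
  apply h3
  have : (B ++ w)[i]? = B[i]? := List.getElem?_append_left h2
  rw [← this, ← ht, List.getElem?_append_left h1]

theorem pvRep_match (o n w : List Char) (ho : o ≠ []) :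
    pvRep o n (o ++ w) = n ++ pvRep o n w := by
  obtain ⟨o0, os, rfl⟩ : ∃ o0 os, o = o0 :: os := by
    cases o with
    | nil => exact absurd rfl ho
    | cons a b => exact ⟨a, b, rfl⟩
  rw [show (o0 :: os) ++ w = o0 :: (os ++ w) from rfl]
  rw [pvRep, if_pos (show (o0 :: os) <+: o0 :: (os ++ w) from List.prefix_append _ _)]
  simp [List.drop_left' rfl]

theorem pvRep_nomatch (o n : List Char) (c : Char) (t : List Char) (h : ¬ o <+: (c :: t)) :
    pvRep o n (c :: t) = c :: pvRep o n t := by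
  rw [pvRep, if_neg h]

-- a block B every position of which mismatches o passes through pvRep untouched
theorem pvPass (o n : List Char)
    (B : List Char)
    (hB : ∀ j, j < B.length → ∃ i, i < o.length ∧ j + i < B.length ∧ o[i]? ≠ B[j + i]?) :
    ∀ w, pvRep o n (B ++ w) = B ++ pvRep o n w := by
  induction B with
  | nil => intro w; simp
  | cons c B' ih =>
    intro w
    obtain ⟨i, hi1, hi2, hi3⟩ := hB 0 (by simp)
    rw [show (c :: B') ++ w = c :: (B' ++ w) from rfl]
    rw [pvRep_nomatch o n c (B' ++ w) (by simpa using pvNpa o (c :: B') w i hi1 (by simpa using hi2) (by simpa using hi3))]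
    rw [ih (fun j hj => by
      obtain ⟨i, h1, h2, h3⟩ := hB (j + 1) (by simp; omega)
      exact ⟨i, h1, by simp at h2 ⊢; omega, by simpa [Nat.add_right_comm] using h3⟩)]
    rfl

-- replacing pattern o by n never creates a new front match of any suffix of Q
theorem pvNoCreate (o n : List Char) (ho : o ≠ []) (Q : List Char)
    (hQ : ∀ s ∈ Q.tails, s ≠ [] → ¬ s <+: n ∧ ¬ n <+: s) :
    ∀ (N : Nat) (x q : List Char), x.length ≤ N → q ∈ Q.tails →
      q <+: pvRep o n x → q <+: x := by
  intro N
  induction N with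
  | zero =>
    intro x q hx hq hp
    have : x = [] := List.eq_nil_of_length_eq_zero (Nat.le_zero.mp hx)
    subst this
    simpa [pvRep] using hp
  | succ m ih =>
    intro x q hx hq hp
    cases x with
    | nil => simpa [pvRep] using hp
    | cons c t =>
      by_cases hm : o <+: (c :: t)
      · rw [pvRep, if_pos hm] at hp
        cases q with
        | nil => exact List.nil_prefix
        | cons a q' =>
          exfalso
          have hqs := hQ (a :: q') hq (by simp)
          by_cases hlen : (a :: q').length ≤ n.length
          · exact hqs.1 (List.prefix_of_prefix_length_le hp (List.prefix_append _ _) hlen)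
          · exact hqs.2 (List.prefix_of_prefix_length_le (List.prefix_append _ _) hp (by omega))
      · rw [pvRep_nomatch o n c t hm] at hp
        cases q with
        | nil => exact List.nil_prefix
        | cons a q' =>
          rw [List.cons_prefix_cons] at hp ⊢
          refine ⟨hp.1, ?_⟩
          have hq' : q' ∈ Q.tails := by
            rw [List.mem_tails] at hq ⊢
            exact List.IsSuffix.trans (List.suffix_cons a q') hq
          exact ih t q' (by simp at hx; omega) hq' hp.2

-- scan equations for a front match of each pattern
theorem pvScan_cons (c : Char) (cs : List Char) :
    pvScanGo (c :: cs) =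
      if pvP1 <+: (c :: cs) then pvRd ++ pvScanGo (List.drop 11 cs)
      else if pvP2 <+: (c :: cs) then pvRs ++ pvScanGo (List.drop 11 cs)
      else if pvP3 <+: (c :: cs) then pvRd ++ pvScanGo (List.drop 8 cs)
      else if pvP4 <+: (c :: cs) then pvRs ++ pvScanGo (List.drop 8 cs)
      else c :: pvScanGo cs := by
  rw [pvScanGo]

-- scan equations for a front match of each pattern
theorem pvScan_m1 (r : List Char) : pvScanGo (pvP1 ++ r) = pvRd ++ pvScanGo r := by
  rw [show pvP1 ++ r = 'l' :: (['a','n','g','=','"','z','h','-','C','N','"'] ++ r) from rfl,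
      pvScan_cons,
      if_pos (show pvP1 <+: 'l' :: (['a','n','g','=','"','z','h','-','C','N','"'] ++ r) from List.prefix_append _ _),
      List.drop_left' (i := 11) (l₁ := ['a','n','g','=','"','z','h','-','C','N','"']) rfl]

theorem pvScan_m2 (r : List Char) : pvScanGo (pvP2 ++ r) = pvRs ++ pvScanGo r := by
  rw [show pvP2 ++ r = 'l' :: (['a','n','g','=','\'','z','h','-','C','N','\''] ++ r) from rfl,
      pvScan_cons,
      if_neg (show ¬ pvP1 <+: 'l' :: (['a','n','g','=','\'','z','h','-','C','N','\''] ++ r) from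
        pvNpa pvP1 pvP2 r 5 (by decide) (by decide) (by decide)),
      if_pos (show pvP2 <+: 'l' :: (['a','n','g','=','\'','z','h','-','C','N','\''] ++ r) from List.prefix_append _ _),
      List.drop_left' (i := 11) (l₁ := ['a','n','g','=','\'','z','h','-','C','N','\'']) rfl]

theorem pvScan_m3 (r : List Char) : pvScanGo (pvP3 ++ r) = pvRd ++ pvScanGo r := by
  rw [show pvP3 ++ r = 'l' :: (['a','n','g','=','"','z','h','"'] ++ r) from rfl,
      pvScan_cons,
      if_neg (show ¬ pvP1 <+: 'l' :: (['a','n','g','=','"','z','h','"'] ++ r) from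
        pvNpa pvP1 pvP3 r 8 (by decide) (by decide) (by decide)),
      if_neg (show ¬ pvP2 <+: 'l' :: (['a','n','g','=','"','z','h','"'] ++ r) from
        pvNpa pvP2 pvP3 r 5 (by decide) (by decide) (by decide)),
      if_pos (show pvP3 <+: 'l' :: (['a','n','g','=','"','z','h','"'] ++ r) from List.prefix_append _ _),
      List.drop_left' (i := 8) (l₁ := ['a','n','g','=','"','z','h','"']) rfl]

theorem pvScan_m4 (r : List Char) : pvScanGo (pvP4 ++ r) = pvRs ++ pvScanGo r := by
  rw [show pvP4 ++ r = 'l' :: (['a','n','g','=','\'','z','h','\''] ++ r) from rfl,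
      pvScan_cons,
      if_neg (show ¬ pvP1 <+: 'l' :: (['a','n','g','=','\'','z','h','\''] ++ r) from
        pvNpa pvP1 pvP4 r 5 (by decide) (by decide) (by decide)),
      if_neg (show ¬ pvP2 <+: 'l' :: (['a','n','g','=','\'','z','h','\''] ++ r) from
        pvNpa pvP2 pvP4 r 8 (by decide) (by decide) (by decide)),
      if_neg (show ¬ pvP3 <+: 'l' :: (['a','n','g','=','\'','z','h','\''] ++ r) from
        pvNpa pvP3 pvP4 r 5 (by decide) (by decide) (by decide)),
      if_pos (show pvP4 <+: 'l' :: (['a','n','g','=','\'','z','h','\''] ++ r) from List.prefix_append _ _),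
      List.drop_left' (i := 8) (l₁ := ['a','n','g','=','\'','z','h','\'']) rfl]

-- ===== main chain lemma: the four sequential replaces equal the single scan =====
theorem pvChain : ∀ (N : Nat) (x : List Char), x.length ≤ N →
    pvRep pvP4 pvRs (pvRep pvP3 pvRd (pvRep pvP2 pvRs (pvRep pvP1 pvRd x))) = pvScanGo x := by
  intro N
  induction N with
  | zero =>
    intro x hx
    have : x = [] := List.eq_nil_of_length_eq_zero (Nat.le_zero.mp hx)
    subst this
    simp [pvRep, pvScanGo]
  | succ m ih =>
    intro x hx
    cases x with
    | nil => simp [pvRep, pvScanGo]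
    | cons c cs =>
      by_cases h1 : pvP1 <+: (c :: cs)
      · obtain ⟨r, hr⟩ := h1
        rw [← hr,
            pvRep_match pvP1 pvRd r (by decide),
            pvPass pvP2 pvRs pvRd (by decide) _,
            pvPass pvP3 pvRd pvRd (by decide) _,
            pvPass pvP4 pvRs pvRd (by decide) _,
            pvScan_m1 r,
            ih r (by have := congrArg List.length hr; simp [pvP1, pvP2, pvP3, pvP4] at this hx ⊢; omega)]
      · by_cases h2 : pvP2 <+: (c :: cs)
        · obtain ⟨r, hr⟩ := h2
          rw [← hr,
              pvPass pvP1 pvRd pvP2 (by decide) _,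
              pvRep_match pvP2 pvRs _ (by decide),
              pvPass pvP3 pvRd pvRs (by decide) _,
              pvPass pvP4 pvRs pvRs (by decide) _,
              pvScan_m2 r,
              ih r (by have := congrArg List.length hr; simp [pvP1, pvP2, pvP3, pvP4] at this hx ⊢; omega)]
        · by_cases h3 : pvP3 <+: (c :: cs)
          · obtain ⟨r, hr⟩ := h3
            rw [← hr,
                pvPass pvP1 pvRd pvP3 (by decide) _,
                pvPass pvP2 pvRs pvP3 (by decide) _,
                pvRep_match pvP3 pvRd _ (by decide),
                pvPass pvP4 pvRs pvRd (by decide) _,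
                pvScan_m3 r,
                ih r (by have := congrArg List.length hr; simp [pvP1, pvP2, pvP3, pvP4] at this hx ⊢; omega)]
          · by_cases h4 : pvP4 <+: (c :: cs)
            · obtain ⟨r, hr⟩ := h4
              rw [← hr,
                  pvPass pvP1 pvRd pvP4 (by decide) _,
                  pvPass pvP2 pvRs pvP4 (by decide) _,
                  pvPass pvP3 pvRd pvP4 (by decide) _,
                  pvRep_match pvP4 pvRs _ (by decide),
                  pvScan_m4 r,
                  ih r (by have := congrArg List.length hr; simp [pvP1, pvP2, pvP3, pvP4] at this hx ⊢; omega)]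
            · have e1 : pvRep pvP1 pvRd (c :: cs) = c :: pvRep pvP1 pvRd cs :=
                pvRep_nomatch _ _ _ _ h1
              have h2' : ¬ pvP2 <+: pvRep pvP1 pvRd (c :: cs) := fun hp =>
                h2 (pvNoCreate pvP1 pvRd (by decide) pvP2 (by decide) (c :: cs).length (c :: cs)
                  pvP2 le_rfl (by simp [List.mem_tails]) hp)
              have e2 : pvRep pvP2 pvRs (pvRep pvP1 pvRd (c :: cs)) =
                  c :: pvRep pvP2 pvRs (pvRep pvP1 pvRd cs) := by
                rw [e1] at h2' ⊢
                exact pvRep_nomatch _ _ _ _ h2'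
              have h3' : ¬ pvP3 <+: pvRep pvP2 pvRs (pvRep pvP1 pvRd (c :: cs)) := fun hp =>
                h3 (pvNoCreate pvP1 pvRd (by decide) pvP3 (by decide) (c :: cs).length (c :: cs)
                  pvP3 le_rfl (by simp [List.mem_tails])
                  (pvNoCreate pvP2 pvRs (by decide) pvP3 (by decide)
                    (pvRep pvP1 pvRd (c :: cs)).length (pvRep pvP1 pvRd (c :: cs))
                    pvP3 le_rfl (by simp [List.mem_tails]) hp))
              have e3 : pvRep pvP3 pvRd (pvRep pvP2 pvRs (pvRep pvP1 pvRd (c :: cs))) =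
                  c :: pvRep pvP3 pvRd (pvRep pvP2 pvRs (pvRep pvP1 pvRd cs)) := by
                rw [e2] at h3' ⊢
                exact pvRep_nomatch _ _ _ _ h3'
              have h4' : ¬ pvP4 <+: pvRep pvP3 pvRd (pvRep pvP2 pvRs (pvRep pvP1 pvRd (c :: cs))) := fun hp =>
                h4 (pvNoCreate pvP1 pvRd (by decide) pvP4 (by decide) (c :: cs).length (c :: cs)
                  pvP4 le_rfl (by simp [List.mem_tails])
                  (pvNoCreate pvP2 pvRs (by decide) pvP4 (by decide)
                    (pvRep pvP1 pvRd (c :: cs)).length (pvRep pvP1 pvRd (c :: cs))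
                    pvP4 le_rfl (by simp [List.mem_tails])
                    (pvNoCreate pvP3 pvRd (by decide) pvP4 (by decide)
                      (pvRep pvP2 pvRs (pvRep pvP1 pvRd (c :: cs))).length
                      (pvRep pvP2 pvRs (pvRep pvP1 pvRd (c :: cs)))
                      pvP4 le_rfl (by simp [List.mem_tails]) hp)))
              have e4 : pvRep pvP4 pvRs (pvRep pvP3 pvRd (pvRep pvP2 pvRs (pvRep pvP1 pvRd (c :: cs)))) =
                  c :: pvRep pvP4 pvRs (pvRep pvP3 pvRd (pvRep pvP2 pvRs (pvRep pvP1 pvRd cs))) := by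
                rw [e3] at h4' ⊢
                exact pvRep_nomatch _ _ _ _ h4'
              rw [e4, ih cs (by simp at hx; omega),
                  pvScan_cons, if_neg h1, if_neg h2, if_neg h3, if_neg h4]

theorem fix_common_locale_artifacts_spec : Claim_equal_fix_common_locale_artifacts := by
  intro text _
  unfold Spec_fix_common_locale_artifacts fix_common_locale_artifacts fix_common_locale_artifacts_alt
  apply String.toList_inj.mp
  rw [PySem.Str.toList_replace, PySem.Str.toList_replace, PySem.Str.toList_replace,
      PySem.Str.toList_replace, String.toList_ofList]
  simp only [show ("lang=\"zh-CN\"" : String).toList = pvP1 from by decide,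
      show ("lang=\"en\"" : String).toList = pvRd from by decide,
      show ("lang='zh-CN'" : String).toList = pvP2 from by decide,
      show ("lang='en'" : String).toList = pvRs from by decide,
      show ("lang=\"zh\"" : String).toList = pvP3 from by decide,
      show ("lang='zh'" : String).toList = pvP4 from by decide]
  rw [pvReplace_eq_rep _ _ _ (by decide), pvReplace_eq_rep _ _ _ (by decide),
      pvReplace_eq_rep _ _ _ (by decide), pvReplace_eq_rep _ _ _ (by decide)]
  simp only [String.toList_ofList]
  exact pvChain text.toList.length text.toList le_rfl
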